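-- pv_equiv track=rewrite | github.com/kom-senapati/bot-verse | myenv/Lib/site-packages/jinjaMarkdown/markdownExtension.py | image
-- ===== SOURCE A (Python) =====
-- def image(inputText):
--     imageAlt = ""
--     imageSource =""
--     if inputText[0] == "!":
--         i = 0
--         if inputText[1] == "[":
--             i += 2
--             while i < len(inputText):
--                 if inputText[i] == "]":
--                     break
--                 else:
--                     imageAlt += inputText[i]
--                     i += 1
--
--         if inputText[i+1] == "(":
--             j=i + 2
--             while j < len(inputText):
--                 if inputText[j] == ")":
--                     break
--                 else:
--                     imageSource += inputText[j]
--                     j += 1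
--
--         outputText = "<img src=" + imageSource + " alt=" + imageAlt + ">"
--         return outputText
--     else:
--         return  inputText
-- ===== SOURCE B (Python) =====
-- def image(inputText):
--     if inputText[0] != "!":
--         return inputText
--     if inputText[1] == "[":
--         p = inputText.find("]", 2)
--         if p == -1:
--             imageAlt, i = inputText[2:], len(inputText)
--         else:
--             imageAlt, i = inputText[2:p], p
--     else:
--         imageAlt, i = "", 0
--     if inputText[i + 1] == "(":
--         q = inputText.find(")", i + 2)
--         imageSource = inputText[i + 2:] if q == -1 else inputText[i + 2:q]
--     else:
--         imageSource = ""
--     return "<img src=" + imageSource + " alt=" + imageAlt + ">"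
-- ===== Notes on version B (the rewrite author's own statement) =====
-- stated objective: simpler
-- what changed: Replaced A's two index-stepping while loops that accumulate characters one by one with str.find plus slicing to extract the alt text and the source in one step each.
import Mathlib
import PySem

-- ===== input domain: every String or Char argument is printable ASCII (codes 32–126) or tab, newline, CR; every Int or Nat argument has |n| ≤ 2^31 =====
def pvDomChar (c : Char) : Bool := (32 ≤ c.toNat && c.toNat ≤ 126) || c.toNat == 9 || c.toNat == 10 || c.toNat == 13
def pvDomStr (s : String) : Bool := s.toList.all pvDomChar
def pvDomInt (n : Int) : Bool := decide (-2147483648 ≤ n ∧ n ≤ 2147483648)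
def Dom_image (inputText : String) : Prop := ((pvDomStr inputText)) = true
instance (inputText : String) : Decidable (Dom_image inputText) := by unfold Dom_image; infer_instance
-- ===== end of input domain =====

-- B replaces A's two character-accumulating while loops with find + slice (objective: simpler).

-- ===== PORT A =====
-- A's while loop: scan from index i until char c (or end), accumulating the
-- skipped characters; returns the final index and the accumulator.
def imageScan (cs : List Char) (c : Char) (i : Nat) (acc : List Char) : Nat × List Char :=
  if h : i < cs.length then
    if cs[i] = c then (i, acc)
    else imageScan cs c (i + 1) (acc ++ [cs[i]])
  else (i, acc)
termination_by cs.length - i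

-- Out-of-range indexing (Python IndexError) is modelled by getD with a default
-- that never equals the compared character inside Pre_; exact on Pre_.
def image (inputText : String) : String :=
  let cs := inputText.toList
  if cs.getD 0 ' ' = '!' then
    let r := if cs.getD 1 ' ' = '[' then imageScan cs ']' 2 [] else (0, [])
    let imageSource :=
      if cs.getD (r.1 + 1) ' ' = '(' then (imageScan cs ')' (r.1 + 2) []).2 else []
    String.mk ("<img src=".toList ++ imageSource ++ " alt=".toList ++ r.2 ++ ">".toList)
  else inputText

-- ===== PORT B =====
-- str.find of a single character ported as List.findIdx (= index, or length if absent).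
def image_alt (inputText : String) : String :=
  let cs := inputText.toList
  if cs.getD 0 ' ' ≠ '!' then inputText
  else
    let ai : List Char × Nat :=
      if cs.getD 1 ' ' = '[' then
        let t := cs.drop 2
        let k := t.findIdx (· == ']')
        if k < t.length then (t.take k, 2 + k) else (t, cs.length)
      else ([], 0)
    let imageSource :=
      if cs.getD (ai.2 + 1) ' ' = '(' then
        let u := cs.drop (ai.2 + 2)
        let q := u.findIdx (· == ')')
        if q < u.length then u.take q else u
      else []
    String.mk ("<img src=".toList ++ imageSource ++ " alt=".toList ++ ai.1 ++ ">".toList)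

-- ===== PRECONDITION & SPEC =====
-- Pre_ excludes exactly the inputs where A raises IndexError: the empty string;
-- a string starting '!' of length 1; and '![…' whose first ']' after index 2 is
-- missing or is the last character (then inputText[i+1] is out of range).
def Pre_image (inputText : String) : Prop :=
  inputText.toList ≠ [] ∧
  (inputText.toList.getD 0 ' ' = '!' →
    2 ≤ inputText.toList.length ∧
    (inputText.toList.getD 1 ' ' = '[' →
      (inputText.toList.drop 2).findIdx (· == ']') + 1 <
        (inputText.toList.drop 2).length))
instance (inputText : String) : Decidable (Pre_image inputText) := by
  unfold Pre_image; infer_instance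

def pvWitness_image : String := "![a](b)"

def Spec_image (inputText : String) (out : String) : Prop := out = image_alt inputText
instance (inputText : String) (out : String) : Decidable (Spec_image inputText out) := by unfold Spec_image; infer_instance

-- ===== CLAIM (what is proved, stated in full; the proofs are below) =====
def Claim_equal_image : Prop := ∀ (inputText : String), Dom_image inputText → Pre_image inputText → Spec_image inputText (image inputText)

-- ===== LEMMAS AND PROOFS =====

-- A's scan loop computes findIdx + take/drop of the remaining suffix.
theorem imageScan_eq (cs : List Char) (c : Char) (i : Nat) (acc : List Char)
    (hi : i ≤ cs.length) :
    imageScan cs c i acc =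
      if (cs.drop i).findIdx (· == c) < (cs.drop i).length
      then (i + (cs.drop i).findIdx (· == c),
            acc ++ (cs.drop i).take ((cs.drop i).findIdx (· == c)))
      else (cs.length, acc ++ cs.drop i) := by
  by_cases h : i < cs.length
  · rw [imageScan]
    simp only [dif_pos h]
    have hdrop : cs.drop i = cs[i] :: cs.drop (i + 1) :=
      List.drop_eq_getElem_cons h
    by_cases hc : cs[i] = c
    · have hcb : (cs[i] == c) = true := beq_iff_eq.mpr hc
      rw [if_pos hc, hdrop]
      simp only [List.findIdx_cons, hcb, cond_true, List.length_cons, List.take_zero]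
      rw [if_pos (Nat.succ_pos _)]
      simp
    · have hcb : (cs[i] == c) = false := beq_eq_false_iff_ne.mpr hc
      have hrec := imageScan_eq cs c (i + 1) (acc ++ [cs[i]]) (by omega)
      rw [if_neg hc, hrec, hdrop]
      simp only [List.findIdx_cons, hcb, cond_false, List.length_cons,
        List.take_succ_cons]
      by_cases hlt : (cs.drop (i + 1)).findIdx (· == c) < (cs.drop (i + 1)).length
      · rw [if_pos hlt, if_pos (by omega)]
        simp [List.append_assoc]
        omega
      · rw [if_neg hlt, if_neg (by omega)]
        simp [List.append_assoc]
  · rw [imageScan]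
    simp only [dif_neg h]
    have hnil : cs.drop i = [] := List.drop_eq_nil_of_le (by omega)
    simp [hnil]
    omega
termination_by cs.length - i

theorem image_spec : Claim_equal_image := by
  unfold Claim_equal_image Spec_image
  intro s _ hpre
  obtain ⟨hne, hbang⟩ := hpre
  by_cases h0 : s.toList.getD 0 ' ' = '!'
  · obtain ⟨hlen, hbr⟩ := hbang h0
    have hdl : (s.toList.drop 2).length = s.toList.length - 2 := List.length_drop
    rw [image, image_alt,
      if_pos h0, if_neg (show ¬(s.toList.getD 0 ' ' ≠ '!') from not_not_intro h0)]
    by_cases h1 : s.toList.getD 1 ' ' = '['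
    · have hk := hbr h1
      have hklt : (s.toList.drop 2).findIdx (· == ']') < (s.toList.drop 2).length := by
        omega
      rw [if_pos h1, if_pos h1,
        imageScan_eq s.toList ']' 2 [] (by omega), if_pos hklt, if_pos hklt]
      simp only [List.nil_append]
      have h2k : 2 + (s.toList.drop 2).findIdx (· == ']') + 2 ≤ s.toList.length := by
        omega
      by_cases hp :
          s.toList.getD (2 + (s.toList.drop 2).findIdx (· == ']') + 1) ' ' = '('
      · rw [if_pos hp, if_pos hp, imageScan_eq s.toList ')' _ [] h2k]
        by_cases hq :
            (s.toList.drop (2 + (s.toList.drop 2).findIdx (· == ']') + 2)).findIdx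
                (· == ')') <
              (s.toList.drop (2 + (s.toList.drop 2).findIdx (· == ']') + 2)).length
        · rw [if_pos hq, if_pos hq]
          simp
        · rw [if_neg hq, if_neg hq]
          simp
      · rw [if_neg hp, if_neg hp]
    · rw [if_neg h1, if_neg h1]
      dsimp only
      by_cases hp : s.toList.getD (0 + 1) ' ' = '('
      · rw [if_pos hp, if_pos hp, imageScan_eq s.toList ')' (0 + 2) [] (by omega)]
        by_cases hq :
            (s.toList.drop (0 + 2)).findIdx (· == ')') <
              (s.toList.drop (0 + 2)).length
        · rw [if_pos hq, if_pos hq]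
          simp
        · rw [if_neg hq, if_neg hq]
          simp
      · rw [if_neg hp, if_neg hp]
  · rw [image, image_alt,
      if_neg h0, if_pos (show s.toList.getD 0 ' ' ≠ '!' from h0)]
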